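-- pv_equiv track=rewrite | github.com/JasonSteving99/coding-agent | advent_of_code/year2024/day14/part2/solution.py | simulate_until_tree
-- ===== SOURCE A (Python) =====
-- from typing import List, Tuple, Dict, Set
-- from collections import defaultdict
--
-- def update_position(pos: Tuple[int, int], vel: Tuple[int, int], width: int, height: int) -> Tuple[int, int]:
--     """Update position considering teleportation at boundaries."""
--     x, y = pos[0] + vel[0], pos[1] + vel[1]
--     x = x % width
--     y = y % height
--     return (x, y)
--
-- def is_christmas_tree_pattern(positions: Dict[Tuple[int, int], int], width: int, height: int) -> bool:
--     """Check if the current robot positions form a Christmas tree pattern."""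
--     # Convert positions to a set of occupied coordinates for easier checking
--     occupied = set()
--     for pos, count in positions.items():
--         for _ in range(count):
--             occupied.add(pos)
--
--     # Get bounds of the occupied positions
--     if not occupied:
--         return False
--
--     levels = defaultdict(set)
--     for x, y in occupied:
--         levels[y].add(x)
--
--     # Sort levels from top to bottom
--     sorted_levels = sorted(levels.items(), key=lambda x: x[0])
--
--     if len(sorted_levels) < 3:  # Need minimum height for a tree
--         return False
--
--     # Check for single point or line at the top (star)
--     if len(sorted_levels[0][1]) > 2:  # Star should be small at top level
--       return False
--
--     # Check for at least two points on second level
--     if len(sorted_levels[1][1]) < 2: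
--         return False
--
--     # Check for at least two points in the bottom level (trunk)
--     if len(sorted_levels[-1][1]) < 2:
--         return False
--
--     return True
--
-- def simulate_until_tree(robots: List[Tuple[Tuple[int, int], Tuple[int, int]]],
--                        width: int, height: int, max_seconds: int = 1000) -> int:
--     """Simulate robot movement until Christmas tree pattern is found."""
--     for second in range(max_seconds):
--         positions = {}
--
--         # Update positions for all robots
--         for pos, vel in robots:
--             curr_pos = pos
--             for _ in range(second):
--                 curr_pos = update_position(curr_pos, vel, width, height)
--             positions[curr_pos] = positions.get(curr_pos, 0) + 1
--
--         # Check if current positions form a Christmas tree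
--         if is_christmas_tree_pattern(positions, width, height):
--             return second
--
--     return -1  # Pattern not found within max_seconds
-- ===== SOURCE B (Python) =====
-- # Alternative implementation: keeps the robots' current positions and advances them
-- # one step per second (rather than re-simulating every robot from second 0 each second);
-- # the pattern test works on plain sets, no count dict / defaultdict / items sort of pairs.
-- def _is_tree(positions):
--     pts = set(positions)
--     ys = sorted({y for _, y in pts})
--     if len(ys) < 3:
--         return False
--
--     def row(y):
--         return len({x for x, yy in pts if yy == y})
--
--     return row(ys[0]) <= 2 and row(ys[1]) >= 2 and row(ys[-1]) >= 2
--
--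
-- def simulate_until_tree(robots, width, height, max_seconds=1000):
--     pts = [(pos, vel) for pos, vel in robots]
--     for second in range(max_seconds):
--         if _is_tree([p for p, _ in pts]):
--             return second
--         pts = [(((x + vx) % width, (y + vy) % height), (vx, vy))
--                for (x, y), (vx, vy) in pts]
--     return -1
-- ===== Notes on version B (the rewrite author's own statement) =====
-- stated objective: alternative
-- what changed: B keeps the robots' current positions and advances them one step per second (instead of re-simulating every robot from second 0 at every second), and the pattern test is done with plain set/sorted comprehensions instead of a count dict, a defaultdict of sets and a sort of (y, set) items.
-- outside the precondition, e.g. on simulate_until_tree([((0, 0), (1, 1))], 0, 0, 1): A returns -1, B raises ZeroDivisionError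
import Mathlib
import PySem

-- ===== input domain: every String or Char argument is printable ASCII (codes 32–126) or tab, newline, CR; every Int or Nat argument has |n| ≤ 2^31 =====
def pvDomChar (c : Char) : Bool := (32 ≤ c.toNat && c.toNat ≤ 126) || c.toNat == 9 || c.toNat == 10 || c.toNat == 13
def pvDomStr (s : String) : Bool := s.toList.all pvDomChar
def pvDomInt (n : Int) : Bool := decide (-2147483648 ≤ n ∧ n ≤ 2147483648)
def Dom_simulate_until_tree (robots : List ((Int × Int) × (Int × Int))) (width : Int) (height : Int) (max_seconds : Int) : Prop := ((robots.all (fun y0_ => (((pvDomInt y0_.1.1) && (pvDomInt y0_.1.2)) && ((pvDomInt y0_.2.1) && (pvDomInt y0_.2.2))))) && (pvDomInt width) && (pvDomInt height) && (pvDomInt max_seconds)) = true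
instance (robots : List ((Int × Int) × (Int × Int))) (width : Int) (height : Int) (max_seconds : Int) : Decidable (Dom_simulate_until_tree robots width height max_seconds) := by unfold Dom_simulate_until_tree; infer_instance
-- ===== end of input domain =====

-- B (simulate_until_tree_alt) advances the robots one step per second instead of re-simulating
-- every robot from second 0 at every second, and tests the pattern with plain sets.
-- A's iteration over the Python set `occupied` only feeds a y-keyed grouping whose final boolean
-- is independent of that iteration order, so porting it in first-insertion order is exact.

-- ===== PORT A =====
def update_position (pos : Int × Int) (vel : Int × Int) (width : Int) (height : Int) : Int × Int :=
  (PySem.Int.mod (pos.1 + vel.1) width, PySem.Int.mod (pos.2 + vel.2) height)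

def is_christmas_tree_pattern (positions : PySem.Dict (Int × Int) Int) (width : Int) (height : Int) : Bool :=
  let occupied : PySem.Set (Int × Int) :=
    positions.items.foldl (fun s p => (PySem.List.pyRange 0 p.2 1).foldl (fun s _ => PySem.Set.add s p.1) s) PySem.Set.empty
  if occupied = [] then false
  else
    let levels : PySem.Dict Int (PySem.Set Int) :=
      occupied.foldl (fun d q => d.modify q.2 PySem.Set.empty (fun s => PySem.Set.add s q.1)) PySem.Dict.empty
    let sorted_levels := PySem.List.sorted levels.items (fun q => q.1) false
    if sorted_levels.length < 3 then false
    else if 2 < (PySem.List.pyGetD sorted_levels 0 (0, PySem.Set.empty)).2.length then false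
    else if (PySem.List.pyGetD sorted_levels 1 (0, PySem.Set.empty)).2.length < 2 then false
    else if (PySem.List.pyGetD sorted_levels (-1) (0, PySem.Set.empty)).2.length < 2 then false
    else true

def pvPositionsA (robots : List ((Int × Int) × (Int × Int))) (width : Int) (height : Int) (second : Int) : PySem.Dict (Int × Int) Int :=
  robots.foldl (fun d r =>
    let curr := (PySem.List.pyRange 0 second 1).foldl (fun c _ => update_position c r.2 width height) r.1
    d.insert curr (d.getD curr 0 + 1)) PySem.Dict.empty

def pvLoopA (robots : List ((Int × Int) × (Int × Int))) (width : Int) (height : Int) : List Int → Int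
  | [] => -1
  | s :: rest =>
    if is_christmas_tree_pattern (pvPositionsA robots width height s) width height then s
    else pvLoopA robots width height rest

def simulate_until_tree (robots : List ((Int × Int) × (Int × Int))) (width : Int) (height : Int) (max_seconds : Int) : Int :=
  pvLoopA robots width height (PySem.List.pyRange 0 max_seconds 1)

-- ===== PORT B =====
def pvStepB (width : Int) (height : Int) (r : (Int × Int) × (Int × Int)) : (Int × Int) × (Int × Int) :=
  ((PySem.Int.mod (r.1.1 + r.2.1) width, PySem.Int.mod (r.1.2 + r.2.2) height), (r.2.1, r.2.2))

def pvRow (pts : PySem.Set (Int × Int)) (y : Int) : Nat :=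
  (PySem.Set.ofList ((pts.filter (fun p => p.2 == y)).map (·.1))).length

def pvTreeB (positions : List (Int × Int)) : Bool :=
  let pts := PySem.Set.ofList positions
  let ys := PySem.List.sorted (PySem.Set.ofList (pts.map (·.2))) (fun y => y) false
  if ys.length < 3 then false
  else decide (pvRow pts (PySem.List.pyGetD ys 0 0) ≤ 2 ∧
               2 ≤ pvRow pts (PySem.List.pyGetD ys 1 0) ∧
               2 ≤ pvRow pts (PySem.List.pyGetD ys (-1) 0))

def pvLoopB (width : Int) (height : Int) : List Int → List ((Int × Int) × (Int × Int)) → Int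
  | [], _ => -1
  | s :: rest, pts =>
    if pvTreeB (pts.map (·.1)) then s
    else pvLoopB width height rest (pts.map (pvStepB width height))

def simulate_until_tree_alt (robots : List ((Int × Int) × (Int × Int))) (width : Int) (height : Int) (max_seconds : Int) : Int :=
  pvLoopB width height (PySem.List.pyRange 0 max_seconds 1) robots

-- ===== PRECONDITION & SPEC =====
-- Pre_ excludes zero width/height with a positive time budget: once a movement step is simulated,
-- Python's '% 0' raises ZeroDivisionError (A still returns on the rare zero-dimension inputs whose
-- very first check settles the answer before any step; B naturally raises one iteration earlier there).
def Pre_simulate_until_tree (robots : List ((Int × Int) × (Int × Int))) (width : Int) (height : Int) (max_seconds : Int) : Prop :=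
  (width ≠ 0 ∧ height ≠ 0) ∨ max_seconds ≤ 0
instance (robots : List ((Int × Int) × (Int × Int))) (width : Int) (height : Int) (max_seconds : Int) : Decidable (Pre_simulate_until_tree robots width height max_seconds) := by unfold Pre_simulate_until_tree; infer_instance

def pvWitness_simulate_until_tree : (List ((Int × Int) × (Int × Int))) × Int × Int × Int :=
  ([((0, 0), (1, 1)), ((2, 1), (0, -1))], 5, 7, 3)

def Spec_simulate_until_tree (robots : List ((Int × Int) × (Int × Int))) (width : Int) (height : Int) (max_seconds : Int) (out : Int) : Prop := out = simulate_until_tree_alt robots width height max_seconds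
instance (robots : List ((Int × Int) × (Int × Int))) (width : Int) (height : Int) (max_seconds : Int) (out : Int) : Decidable (Spec_simulate_until_tree robots width height max_seconds out) := by unfold Spec_simulate_until_tree; infer_instance

-- ===== CLAIM (what is proved, stated in full; the proofs are below) =====
def Claim_equal_simulate_until_tree : Prop := ∀ (robots : List ((Int × Int) × (Int × Int))) (width : Int) (height : Int) (max_seconds : Int), Dom_simulate_until_tree robots width height max_seconds → Pre_simulate_until_tree robots width height max_seconds → Spec_simulate_until_tree robots width height max_seconds (simulate_until_tree robots width height max_seconds)

-- ===== LEMMAS AND PROOFS =====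

-- a loop "for _ in l: s.add(x)" with l nonempty adds x once
lemma pv_fold_const_add {α β : Type} [BEq α] [LawfulBEq α] (l : List β) (hl : l ≠ []) (s : PySem.Set α) (x : α) :
    l.foldl (fun s _ => PySem.Set.add s x) s = PySem.Set.add s x := by
  induction l generalizing s with
  | nil => exact absurd rfl hl
  | cons y t ih =>
    simp only [List.foldl_cons]
    rcases eq_or_ne t [] with h | h
    · simp [h]
    · rw [ih h]
      exact PySem.Set.add_of_mem (by simp [PySem.Set.mem_add])

-- A's `occupied` (each dict key added count-many times) is just set(L)
lemma pv_occupied_eq (L : List (Int × Int)) :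
    (PySem.Dict.counter L).items.foldl
      (fun s p => (PySem.List.pyRange 0 p.2 1).foldl (fun s _ => PySem.Set.add s p.1) s) PySem.Set.empty
    = PySem.Set.ofList L := by
  rw [PySem.Dict.items_counter]
  rw [PySem.List.foldl_congr_mem _ _ (fun s p => PySem.Set.add s p.1) _ ?_]
  · rw [List.foldl_map]
    exact ((PySem.Set.ofList_eq_foldl _).symm.trans
      (PySem.Set.ofList_eq_self_of_nodup _ (PySem.Set.nodup_ofList _)))
  · intro acc p hp
    simp only [List.mem_map] at hp
    obtain ⟨k, hk, rfl⟩ := hp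
    have hkL : k ∈ L := (PySem.Set.mem_ofList _ _).mp hk
    have hc : 0 < L.count k := List.count_pos_iff.mpr hkL
    apply pv_fold_const_add
    have := PySem.List.length_pyRange_one 0 ((L.count k : Int))
    intro hnil
    rw [hnil] at this
    simp at this
    omega

-- value of the y-grouping dict at y
lemma pv_getD_levels (l : List (Int × Int)) (d : PySem.Dict Int (PySem.Set Int)) (y : Int) :
    (l.foldl (fun d q => d.modify q.2 PySem.Set.empty (fun s => PySem.Set.add s q.1)) d).getD y PySem.Set.empty
    = PySem.Set.update (d.getD y PySem.Set.empty) ((l.filter (fun q => q.2 == y)).map (·.1)) := by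
  induction l generalizing d with
  | nil => simp [PySem.Set.update_nil]
  | cons q t ih =>
    simp only [List.foldl_cons, List.filter_cons]
    rw [ih]
    by_cases hy : q.2 = y
    · simp [hy, PySem.Dict.getD_modify_self, PySem.Set.update_cons]
    · have hb : (q.2 == y) = false := by simpa using hy
      rw [PySem.Dict.getD_modify_of_ne _ _ _ (Ne.symm hy)]
      simp [hb]

-- the per-second check of A on a multiset L of positions equals B's plain-set check
lemma pv_check_eq (L : List (Int × Int)) (w h : Int) :
    is_christmas_tree_pattern (PySem.Dict.counter L) w h = pvTreeB L := by
  unfold is_christmas_tree_pattern pvTreeB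
  dsimp only
  rw [pv_occupied_eq]
  set occ : PySem.Set (Int × Int) := PySem.Set.ofList L with hocc
  set Ys : PySem.Set Int := PySem.Set.ofList (occ.map (·.2)) with hYs
  set sYs := PySem.List.sorted Ys (fun y => y) false with hsYs
  by_cases hempty : occ = []
  · rw [if_pos hempty]
    have h2 : sYs = [] := by rw [hsYs, hYs, hempty]; rfl
    rw [h2]
    simp
  · rw [if_neg hempty]
    set levels : PySem.Dict Int (PySem.Set Int) :=
      occ.foldl (fun d q => d.modify q.2 PySem.Set.empty (fun s => PySem.Set.add s q.1)) PySem.Dict.empty with hlev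
    have hkeys : levels.keys = Ys := by
      rw [hlev, PySem.Dict.keys_foldl_modify_key occ (fun q => q.2) PySem.Set.empty
        (fun _ q => fun s => PySem.Set.add s q.1) PySem.Dict.empty]
      exact PySem.Set.update_nil_left _
    have hnd : levels.keys.Nodup := by rw [hkeys, hYs]; exact PySem.Set.nodup_ofList _
    have hitems : levels.items = Ys.map (fun y => (y, PySem.Set.ofList ((occ.filter (fun q => q.2 == y)).map (·.1)))) := by
      rw [PySem.Dict.items_eq_map_keys levels hnd PySem.Set.empty, hkeys]
      apply List.map_congr_left
      intro y _
      rw [hlev, pv_getD_levels]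
      rw [PySem.Dict.getD_empty, PySem.Set.update_empty]
    set g : Int → Int × PySem.Set Int := fun y => (y, PySem.Set.ofList ((occ.filter (fun q => q.2 == y)).map (·.1))) with hg
    have hsorted : PySem.List.sorted levels.items (fun q => q.1) false = sYs.map g := by
      apply PySem.List.sorted_eq_of_perm_of_pairwise_lt
      · rw [hitems]
        exact List.Perm.map g (by rw [hsYs]; exact PySem.List.sorted_perm _ _ _)
      · have hp : sYs.Pairwise (· < ·) := by
          rw [hsYs, hYs]; exact PySem.List.sorted_ofList_pairwise_lt _
        exact hp.map g (fun a b hab => hab)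
    rw [hsorted, List.length_map]
    by_cases hlen : sYs.length < 3
    · simp [hlen]
    · rw [if_neg hlen, if_neg hlen]
      have h3 : 3 ≤ sYs.length := by omega
      have e0 : PySem.List.pyGetD (sYs.map g) 0 (0, PySem.Set.empty) = g sYs[0] := by
        rw [PySem.List.pyGetD_eq_getElem _ _ (by norm_num) (by simp; omega)]
        simp
      have e1 : PySem.List.pyGetD (sYs.map g) 1 (0, PySem.Set.empty) = g sYs[1] := by
        rw [PySem.List.pyGetD_eq_getElem _ _ (by norm_num) (by simp; omega)]
        simp
      have elast : PySem.List.pyGetD (sYs.map g) (-1) (0, PySem.Set.empty) = g sYs[sYs.length - 1] := by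
        rw [show ((-1 : Int)) = -((1 : Nat) : Int) by norm_num,
          PySem.List.pyGetD_neg_natCast _ 1 _ (by norm_num) (by simp; omega)]
        simp
      have f0 : PySem.List.pyGetD sYs 0 0 = sYs[0] := by
        rw [PySem.List.pyGetD_eq_getElem _ _ (by norm_num) (by omega)]; norm_num
      have f1 : PySem.List.pyGetD sYs 1 0 = sYs[1] := by
        rw [PySem.List.pyGetD_eq_getElem _ _ (by norm_num) (by omega)]; norm_num
      have flast : PySem.List.pyGetD sYs (-1) 0 = sYs[sYs.length - 1] := by
        rw [show ((-1 : Int)) = -((1 : Nat) : Int) by norm_num,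
          PySem.List.pyGetD_neg_natCast _ 1 _ (by norm_num) (by omega)]
      rw [e0, e1, elast, f0, f1, flast]
      have hrow : ∀ y, (g y).2.length = pvRow occ y := fun y => rfl
      rw [hrow, hrow, hrow]
      split_ifs <;> simp_all <;> omega

lemma pv_stepB_snd (w h : Int) (n : Nat) (r : (Int × Int) × (Int × Int)) :
    ((pvStepB w h)^[n] r).2 = r.2 := by
  induction n generalizing r with
  | zero => simp
  | succ n ih =>
    rw [Function.iterate_succ_apply, ih]
    simp [pvStepB]

-- A's inner re-simulation loop from second 0 equals n applications of B's single step
lemma pv_inner_eq (w h : Int) (n : Nat) (r : (Int × Int) × (Int × Int)) :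
    (PySem.List.pyRange 0 (n : Int) 1).foldl (fun c _ => update_position c r.2 w h) r.1
    = ((pvStepB w h)^[n] r).1 := by
  induction n with
  | zero => simp [PySem.List.pyRange_one_eq_nil le_rfl]
  | succ n ih =>
    rw [Nat.cast_add, Nat.cast_one, PySem.List.pyRange_one_succ_right (by positivity)]
    rw [List.foldl_append, ih, Function.iterate_succ_apply']
    show update_position _ r.2 w h = _
    have h2 := pv_stepB_snd w h n r
    simp only [pvStepB, update_position, h2]

lemma pv_positionsA_eq (robots : List ((Int × Int) × (Int × Int))) (w h : Int) (n : Nat) :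
    pvPositionsA robots w h (n : Int)
    = PySem.Dict.counter (robots.map (fun r => ((pvStepB w h)^[n] r).1)) := by
  unfold pvPositionsA
  rw [← PySem.Dict.foldl_insert_getD_add_one_eq_counter, List.foldl_map]
  apply PySem.List.foldl_congr_mem
  intro acc r _
  simp only [pv_inner_eq w h n r]

lemma pv_loop_eq (robots : List ((Int × Int) × (Int × Int))) (w h : Int) :
    ∀ (k : Nat) (a b : Int), 0 ≤ a → (b - a).toNat = k →
    pvLoopA robots w h (PySem.List.pyRange a b 1)
    = pvLoopB w h (PySem.List.pyRange a b 1) (robots.map ((pvStepB w h)^[a.toNat])) := by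
  intro k
  induction k using Nat.strong_induction_on with
  | _ k ih =>
    intro a b ha hk
    by_cases hba : b ≤ a
    · rw [PySem.List.pyRange_one_eq_nil hba]
      rfl
    · have hab : a < b := by omega
      rw [PySem.List.pyRange_one_cons hab]
      show (if is_christmas_tree_pattern (pvPositionsA robots w h a) w h then a
            else pvLoopA robots w h (PySem.List.pyRange (a+1) b 1))
         = (if pvTreeB ((robots.map ((pvStepB w h)^[a.toNat])).map (·.1)) then a
            else pvLoopB w h (PySem.List.pyRange (a+1) b 1) ((robots.map ((pvStepB w h)^[a.toNat])).map (pvStepB w h)))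
      have hcast : ((a.toNat : Nat) : Int) = a := Int.toNat_of_nonneg ha
      have hchk : is_christmas_tree_pattern (pvPositionsA robots w h a) w h
          = pvTreeB ((robots.map ((pvStepB w h)^[a.toNat])).map (·.1)) := by
        rw [← hcast, pv_positionsA_eq, pv_check_eq, List.map_map]
        rfl
      rw [hchk]
      by_cases ht : pvTreeB ((robots.map ((pvStepB w h)^[a.toNat])).map (·.1))
      · rw [if_pos ht, if_pos ht]
      · rw [if_neg ht, if_neg ht]
        have hrec := ih (b - (a+1)).toNat (by omega) (a+1) b (by omega) rfl
        rw [hrec, List.map_map]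
        congr 1
        apply List.map_congr_left
        intro r _
        show (pvStepB w h)^[(a+1).toNat] r = (pvStepB w h ∘ (pvStepB w h)^[a.toNat]) r
        rw [show (a+1).toNat = a.toNat + 1 by omega, Function.iterate_succ']

-- ===== VERDICT (by name: the statement is the Claim_ definition above) =====
theorem simulate_until_tree_spec : Claim_equal_simulate_until_tree := by
  intro robots width height max_seconds _ _
  unfold Spec_simulate_until_tree simulate_until_tree simulate_until_tree_alt
  have h := pv_loop_eq robots width height (max_seconds - 0).toNat 0 max_seconds le_rfl rfl
  simpa using h
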